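-- pv_equiv track=rewrite | github.com/pytorch/torchtitan | torchtitan/experiments/autopartition/infra/autopipe.py | _cooldown
-- ===== SOURCE A (Python) =====
-- from typing import Dict, List, Tuple
--
-- COMM_OVERHEAD = 0
--
-- def _cooldown(
--     num_stages: int, critical: int, last_fwd_start: int, fwd: List[int], bwd: List[int]
-- ) -> int:
--     """C++ calculate_cooldown_phase"""
--     sz = num_stages - critical
--     if sz <= 0:
--         return last_fwd_start
--
--     dp = [[0] * sz for _ in range(sz)]
--     bwd_start = last_fwd_start
--     for i in range(sz):
--         bwd_start += fwd[critical + 1 + i]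
--         if critical + i != num_stages - 1:
--             bwd_start += COMM_OVERHEAD
--         dp[i][sz - 1 - i] = bwd_start
--
--     for col in range(sz - 2, -1, -1):
--         for row in range(sz - col - 2, -1, -1):
--             o1 = dp[row][col + 1] + bwd[critical + 1 + row] + COMM_OVERHEAD
--             o2 = dp[row + 1][col] + bwd[critical + 1 + row + 1] + COMM_OVERHEAD
--             dp[row][col] = max(o1, o2)
--             if row > 0:
--                 dp[row][col] = max(dp[row][col], dp[row - 1][col + 1])
--     return dp[0][0]
-- ===== SOURCE B (Python) =====
-- from typing import Dict, List, Tuple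
--
-- COMM_OVERHEAD = 0
--
-- def _cooldown(
--     num_stages: int, critical: int, last_fwd_start: int, fwd: List[int], bwd: List[int]
-- ) -> int:
--     """The three-way table recurrence (with its cost-free upward propagation term)
--     unrolls into a prefix maximum: on each new anti-diagonal,
--     value[r] = max_{s <= r+1} (previous[s] + bwd[critical+1+s] + COMM_OVERHEAD).
--     So instead of a 2-D table we sweep one vector per anti-diagonal with a single
--     running maximum per row -- a two-term recurrence, no max-of-three, O(sz) memory."""
--     sz = num_stages - critical
--     if sz <= 0:
--         return last_fwd_start
--
--     # v[r] = completion time on the last anti-diagonal (the base values)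
--     v = []
--     t = last_fwd_start
--     for i in range(sz):
--         t += fwd[critical + 1 + i]
--         if critical + i != num_stages - 1:
--             t += COMM_OVERHEAD
--         v.append(t)
--
--     # move to the previous anti-diagonal sz-1 times, carrying a running prefix max
--     for m in range(1, sz):
--         run = v[0] + bwd[critical + 1] + COMM_OVERHEAD
--         w = []
--         for r in range(sz - m):
--             run = max(run, v[r + 1] + bwd[critical + 1 + r + 1] + COMM_OVERHEAD)
--             w.append(run)
--         v = w
--     return v[0]
-- ===== Notes on version B (the rewrite author's own statement) =====
-- stated objective: alternative
-- what changed: A's max-of-three table recurrence (two bwd moves plus a cost-free upward propagation from dp[row-1][col+1]) is replaced by its closed unrolled form: each new anti-diagonal value is the prefix maximum max_{s<=r+1}(previous[s]+bwd[s]), computed by one running max per row over a rolling vector, so the three-way recurrence and the sz x sz table disappear.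
import Mathlib
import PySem

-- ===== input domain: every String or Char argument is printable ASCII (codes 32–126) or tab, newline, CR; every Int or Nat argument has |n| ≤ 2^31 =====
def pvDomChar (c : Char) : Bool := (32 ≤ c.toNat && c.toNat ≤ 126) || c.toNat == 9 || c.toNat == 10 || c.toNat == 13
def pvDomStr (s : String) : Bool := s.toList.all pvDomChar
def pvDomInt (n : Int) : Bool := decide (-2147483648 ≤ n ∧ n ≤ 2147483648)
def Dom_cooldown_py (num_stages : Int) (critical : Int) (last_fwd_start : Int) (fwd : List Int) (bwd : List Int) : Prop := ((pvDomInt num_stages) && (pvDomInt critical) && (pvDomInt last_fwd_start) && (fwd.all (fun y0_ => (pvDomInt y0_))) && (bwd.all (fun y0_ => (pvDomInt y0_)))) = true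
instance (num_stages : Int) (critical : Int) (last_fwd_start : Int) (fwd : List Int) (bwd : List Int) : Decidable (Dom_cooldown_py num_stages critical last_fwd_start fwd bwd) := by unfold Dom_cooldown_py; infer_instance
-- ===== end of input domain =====

-- B unrolls A's max-of-three table recurrence into its closed prefix-maximum form
-- (value[r] = max_{s ≤ r+1} (previous[s] + bwd[s])): one running max per row over a
-- rolling vector instead of the 2-D table; same results, same O(sz^2) time, O(sz) space.

-- ===== PORT A =====
def pvCOMM_OVERHEAD : Int := 0

-- xs[i] with Python semantics; Pre_ guarantees every access made by either
-- program is in range, so the .getD 0 default is never the returned value.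
def pvAt (xs : List Int) (i : Int) : Int := (PySem.List.pyGet? xs i).getD 0

-- dp[r][c] read / write; A only ever uses indices 0 ≤ r, c < sz, where
-- pyGetD/pySetD coincide with Python's list indexing exactly.
def pvGet2 (dp : List (List Int)) (r c : Int) : Int :=
  PySem.List.pyGetD (PySem.List.pyGetD dp r []) c 0
def pvSet2 (dp : List (List Int)) (r c : Int) (v : Int) : List (List Int) :=
  PySem.List.pySetD dp r (PySem.List.pySetD (PySem.List.pyGetD dp r []) c v)

def cooldown_py (num_stages : Int) (critical : Int) (last_fwd_start : Int) (fwd : List Int) (bwd : List Int) : Int :=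
  let sz := num_stages - critical
  if sz ≤ 0 then last_fwd_start
  else
    let dp0 : List (List Int) := List.replicate sz.toNat (List.replicate sz.toNat 0)
    let st := (PySem.List.pyRange 0 sz 1).foldl (fun (st : List (List Int) × Int) i =>
      let b1 := st.2 + pvAt fwd (critical + 1 + i)
      let b2 := if critical + i ≠ num_stages - 1 then b1 + pvCOMM_OVERHEAD else b1
      (pvSet2 st.1 i (sz - 1 - i) b2, b2)) (dp0, last_fwd_start)
    let dp2 := (PySem.List.pyRange (sz - 2) (-1) (-1)).foldl (fun dp col =>
      (PySem.List.pyRange (sz - col - 2) (-1) (-1)).foldl (fun dp row =>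
        let o1 := pvGet2 dp row (col + 1) + pvAt bwd (critical + 1 + row) + pvCOMM_OVERHEAD
        let o2 := pvGet2 dp (row + 1) col + pvAt bwd (critical + 1 + row + 1) + pvCOMM_OVERHEAD
        let dp' := pvSet2 dp row col (max o1 o2)
        if row > 0 then
          pvSet2 dp' row col (max (pvGet2 dp' row col) (pvGet2 dp' (row - 1) (col + 1)))
        else dp') dp) st.1
    pvGet2 dp2 0 0

-- ===== PORT B =====
def cooldown_py_alt (num_stages : Int) (critical : Int) (last_fwd_start : Int) (fwd : List Int) (bwd : List Int) : Int :=
  let sz := num_stages - critical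
  if sz ≤ 0 then last_fwd_start
  else
    let st := (PySem.List.pyRange 0 sz 1).foldl (fun (st : List Int × Int) i =>
      let t1 := st.2 + pvAt fwd (critical + 1 + i)
      let t2 := if critical + i ≠ num_stages - 1 then t1 + pvCOMM_OVERHEAD else t1
      (st.1 ++ [t2], t2)) ([], last_fwd_start)
    let vF := (PySem.List.pyRange 1 sz 1).foldl (fun v m =>
      ((PySem.List.pyRange 0 (sz - m) 1).foldl (fun (p : Int × List Int) r =>
        let run := max p.1 (pvAt v (r + 1) + pvAt bwd (critical + 1 + r + 1) + pvCOMM_OVERHEAD)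
        (run, p.2 ++ [run])) (pvAt v 0 + pvAt bwd (critical + 1) + pvCOMM_OVERHEAD, [])).2) st.1
    pvAt vF 0

-- ===== PRECONDITION & SPEC =====
-- Pre_ excludes exactly the inputs on which the Python raises IndexError:
-- when sz > 0 both programs read fwd[critical+1 .. num_stages] and (when sz ≥ 2)
-- bwd[critical+1 .. num_stages]; all those indices must be valid Python indices.
def Pre_cooldown_py (num_stages : Int) (critical : Int) (last_fwd_start : Int) (fwd : List Int) (bwd : List Int) : Prop :=
  num_stages - critical ≤ 0 ∨
    (PySem.Raise.InRange fwd.length (critical + 1) ∧ PySem.Raise.InRange fwd.length num_stages ∧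
      (2 ≤ num_stages - critical →
        PySem.Raise.InRange bwd.length (critical + 1) ∧ PySem.Raise.InRange bwd.length num_stages))
instance (num_stages : Int) (critical : Int) (last_fwd_start : Int) (fwd : List Int) (bwd : List Int) : Decidable (Pre_cooldown_py num_stages critical last_fwd_start fwd bwd) := by unfold Pre_cooldown_py; infer_instance

def pvWitness_cooldown_py : Int × Int × Int × List Int × List Int :=
  (4, 1, 7, [1, 2, 3, 4, 5], [1, 1, 2, 3, 4])

def Spec_cooldown_py (num_stages : Int) (critical : Int) (last_fwd_start : Int) (fwd : List Int) (bwd : List Int) (out : Int) : Prop := out = cooldown_py_alt num_stages critical last_fwd_start fwd bwd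
instance (num_stages : Int) (critical : Int) (last_fwd_start : Int) (fwd : List Int) (bwd : List Int) (out : Int) : Decidable (Spec_cooldown_py num_stages critical last_fwd_start fwd bwd out) := by unfold Spec_cooldown_py; infer_instance

-- ===== CLAIM (what is proved, stated in full; the proofs are below) =====
def Claim_equal_cooldown_py : Prop := ∀ (num_stages : Int) (critical : Int) (last_fwd_start : Int) (fwd : List Int) (bwd : List Int), Dom_cooldown_py num_stages critical last_fwd_start fwd bwd → Pre_cooldown_py num_stages critical last_fwd_start fwd bwd → Spec_cooldown_py num_stages critical last_fwd_start fwd bwd (cooldown_py num_stages critical last_fwd_start fwd bwd)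

-- ===== LEMMAS AND PROOFS =====

-- The recurrence A computes: pvW n base bb r c is the value of DP cell (r, c);
-- cells with r + c = n - 1 carry base r, inner cells the max-of-three rule.
def pvW (n : Nat) (base bb : Nat → Int) (r c : Nat) : Int :=
  if n ≤ r + c + 1 then base r
  else
    let m := max (pvW n base bb r (c + 1) + bb r) (pvW n base bb (r + 1) c + bb (r + 1))
    if r = 0 then m else max m (pvW n base bb (r - 1) (c + 1))
termination_by (n - (r + c), r)
decreasing_by
  · apply Prod.Lex.left; omega
  · apply Prod.Lex.left; omega
  · have h2 : n - (r - 1 + (c + 1)) = n - (r + c) := by omega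
    rw [h2]; exact Prod.Lex.right _ (by omega)

theorem pvW_of_le {n r c : Nat} (base bb : Nat → Int) (h : n ≤ r + c + 1) :
    pvW n base bb r c = base r := by
  rw [pvW]; simp [h]

theorem pvW_of_lt {n r c : Nat} (base bb : Nat → Int) (h : r + c + 2 ≤ n) :
    pvW n base bb r c =
      (if r = 0 then max (pvW n base bb r (c + 1) + bb r) (pvW n base bb (r + 1) c + bb (r + 1))
       else max (max (pvW n base bb r (c + 1) + bb r) (pvW n base bb (r + 1) c + bb (r + 1)))
              (pvW n base bb (r - 1) (c + 1))) := by
  rw [pvW]; simp [show ¬ n ≤ r + c + 1 by omega]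

-- the shared prefix accumulation (bwd_start in A, t in B) after k iterations
def pvAcc (num_stages critical : Int) (fwd : List Int) (lfs : Int) : Nat → Int
  | 0 => lfs
  | k + 1 =>
    let t1 := pvAcc num_stages critical fwd lfs k + pvAt fwd (critical + 1 + (k : Int))
    if critical + (k : Int) ≠ num_stages - 1 then t1 + pvCOMM_OVERHEAD else t1

def pvBase (num_stages critical : Int) (fwd : List Int) (lfs : Int) (r : Nat) : Int :=
  pvAcc num_stages critical fwd lfs (r + 1)

def pvBB (critical : Int) (bwd : List Int) (r : Nat) : Int := pvAt bwd (critical + 1 + (r : Int))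

-- 2-D matrix helpers over Nat indices
def getD2 (M : List (List Int)) (r c : Nat) : Int := (M.getD r []).getD c 0

def Dims (n : Nat) (M : List (List Int)) : Prop :=
  M.length = n ∧ ∀ r < n, (M.getD r []).length = n

theorem pvAt_natCast (xs : List Int) (k : Nat) : pvAt xs (k : Int) = xs.getD k 0 := by
  simp [pvAt, List.getD_eq_getElem?_getD]

theorem pvGet2_natCast (M : List (List Int)) (r c : Nat) :
    pvGet2 M (r : Int) (c : Int) = getD2 M r c := by
  simp [pvGet2, getD2, PySem.List.pyGetD_natCast]

theorem pvSet2_natCast (M : List (List Int)) (r c : Nat) (v : Int)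
    (hr : r < M.length) (hc : c < (M.getD r []).length) :
    pvSet2 M (r : Int) (c : Int) v = M.set r ((M.getD r []).set c v) := by
  unfold pvSet2 PySem.List.pySetD
  rw [PySem.List.pyGetD_natCast, PySem.List.pySet?_natCast _ _ _ hc,
    Option.getD_some, PySem.List.pySet?_natCast _ _ _ hr, Option.getD_some]

theorem getD2_set (M : List (List Int)) (r c : Nat) (v : Int) (r' c' : Nat)
    (hr : r < M.length) (hc : c < (M.getD r []).length) :
    getD2 (M.set r ((M.getD r []).set c v)) r' c' =
      if r' = r ∧ c' = c then v else getD2 M r' c' := by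
  simp only [getD2, List.getD_eq_getElem?_getD, List.getElem?_set]
  rcases eq_or_ne r' r with rfl | hR
  · have hM : M[r']? = some (M.getD r' []) := by
      rw [List.getElem?_eq_getElem hr]
      simp [List.getD_eq_getElem?_getD, List.getElem?_eq_getElem hr]
    simp only [if_pos rfl, if_pos hr, hM, Option.getD_some]
    rcases eq_or_ne c' c with rfl | hC
    · have hlen : c' < (M[r']?.getD []).length := by rw [hM]; exact hc
      simp [List.getElem?_set, hlen]
    · simp [List.getElem?_set, hC, Ne.symm hC]
  · simp [Ne.symm hR, hR]

theorem Dims_set (n : Nat) (M : List (List Int)) (r c : Nat) (v : Int)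
    (hD : Dims n M) (hr : r < n) :
    Dims n (M.set r ((M.getD r []).set c v)) := by
  obtain ⟨h1, h2⟩ := hD
  refine ⟨by simp [h1], fun r' hr' => ?_⟩
  rcases eq_or_ne r' r with rfl | hR
  · have : (M.set r' ((M.getD r' []).set c v)).getD r' [] = (M.getD r' []).set c v := by
      rw [List.getD_eq_getElem?_getD, List.getElem?_set, if_pos rfl, if_pos (h1 ▸ hr'),
        Option.getD_some]
    rw [this, List.length_set]; exact h2 r' hr'
  · have : (M.set r ((M.getD r []).set c v)).getD r' [] = M.getD r' [] := by
      rw [List.getD_eq_getElem?_getD, List.getElem?_set, if_neg (Ne.symm hR),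
        ← List.getD_eq_getElem?_getD]
    rw [this]; exact h2 r' hr'

-- ===== B-side: the prefix-maximum sweep computes pvW =====

-- pvP n base bb d s = max_{t ≤ s} (pvW n base bb t (d - t) + bb t), a prefix maximum
-- along the anti-diagonal d.
def pvP (n : Nat) (base bb : Nat → Int) (d : Nat) : Nat → Int
  | 0 => pvW n base bb 0 d + bb 0
  | s + 1 => max (pvP n base bb d s) (pvW n base bb (s + 1) (d - (s + 1)) + bb (s + 1))

-- the heart of B: A's max-of-three recurrence unrolls into a prefix maximum
theorem pvW_unroll (n : Nat) (base bb : Nat → Int) :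
    ∀ r c, r + c + 2 ≤ n → pvW n base bb r c = pvP n base bb (r + c + 1) (r + 1) := by
  intro r
  induction r with
  | zero =>
    intro c h
    rw [pvW_of_lt _ _ h]
    simp [pvP]
  | succ r ih =>
    intro c h
    rw [pvW_of_lt _ _ h, if_neg (Nat.succ_ne_zero r)]
    simp only [Nat.add_sub_cancel]
    have hIH := ih (c + 1) (by omega)
    rw [show r + (c + 1) + 1 = r + 1 + c + 1 by omega] at hIH
    rw [hIH]
    have h2 : pvP n base bb (r + 1 + c + 1) (r + 1 + 1) =
        max (pvP n base bb (r + 1 + c + 1) (r + 1))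
          (pvW n base bb (r + 1 + 1) c + bb (r + 1 + 1)) := by
      rw [pvP, show r + 1 + c + 1 - (r + 1 + 1) = c by omega]
    have h3 : pvP n base bb (r + 1 + c + 1) (r + 1) =
        max (pvP n base bb (r + 1 + c + 1) r)
          (pvW n base bb (r + 1) (c + 1) + bb (r + 1)) := by
      rw [pvP, show r + 1 + c + 1 - (r + 1) = c + 1 by omega]
    rw [h2, h3]
    simp only [max_def]
    split_ifs <;> omega

def b2Step (critical : Int) (bwd v : List Int) (p : Int × List Int) (r : Int) :
    Int × List Int :=
  let run := max p.1 (pvAt v (r + 1) + pvAt bwd (critical + 1 + r + 1) + pvCOMM_OVERHEAD)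
  (run, p.2 ++ [run])

def b2Outer (critical sz : Int) (bwd : List Int) (v : List Int) (m : Int) : List Int :=
  ((PySem.List.pyRange 0 (sz - m) 1).foldl (fun p r => b2Step critical bwd v p r)
    (pvAt v 0 + pvAt bwd (critical + 1) + pvCOMM_OVERHEAD, [])).2

def bStep1 (num_stages critical : Int) (fwd : List Int) (st : List Int × Int) (i : Int) :
    List Int × Int :=
  let t1 := st.2 + pvAt fwd (critical + 1 + i)
  let t2 := if critical + i ≠ num_stages - 1 then t1 + pvCOMM_OVERHEAD else t1
  (st.1 ++ [t2], t2)

theorem getD_append_self (l : List Int) (v : Int) : (l ++ [v]).getD l.length 0 = v := by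
  rw [List.getD_append_right _ _ _ _ (le_refl _)]
  simp

theorem B_loop1 (num_stages critical : Int) (fwd : List Int) (lfs : Int) (k : Nat) :
    (List.range k).foldl (fun st (i : Nat) => bStep1 num_stages critical fwd st (i : Int))
        ([], lfs) =
      ((List.range k).map (pvBase num_stages critical fwd lfs),
        pvAcc num_stages critical fwd lfs k) := by
  induction k with
  | zero => simp [pvAcc]
  | succ k ih =>
    rw [List.range_succ, List.foldl_append, ih, List.map_append]
    simp only [List.foldl_cons, List.foldl_nil, bStep1, List.map_cons, List.map_nil]
    have ht : (if critical + (k : Int) ≠ num_stages - 1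
        then pvAcc num_stages critical fwd lfs k + pvAt fwd (critical + 1 + (k : Int)) +
          pvCOMM_OVERHEAD
        else pvAcc num_stages critical fwd lfs k + pvAt fwd (critical + 1 + (k : Int)))
        = pvAcc num_stages critical fwd lfs (k + 1) := by
      simp only [pvAcc]
    rw [ht]
    simp [pvBase]

theorem B_inner2 (critical : Int) (bwd : List Int) (n : Nat) (base : Nat → Int)
    (d : Nat) (hd : d + 1 ≤ n) (v : List Int)
    (hv : ∀ s, s ≤ d → v.getD s 0 = pvW n base (pvBB critical bwd) s (d - s)) :
    ∀ k, k ≤ d →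
      ((List.range k).foldl (fun p (r : Nat) => b2Step critical bwd v p (r : Int))
          (pvAt v 0 + pvAt bwd (critical + 1) + pvCOMM_OVERHEAD, [])).1
        = pvP n base (pvBB critical bwd) d k ∧
      ((List.range k).foldl (fun p (r : Nat) => b2Step critical bwd v p (r : Int))
          (pvAt v 0 + pvAt bwd (critical + 1) + pvCOMM_OVERHEAD, [])).2.length = k ∧
      ∀ r, r < k →
        ((List.range k).foldl (fun p (r : Nat) => b2Step critical bwd v p (r : Int))
            (pvAt v 0 + pvAt bwd (critical + 1) + pvCOMM_OVERHEAD, [])).2.getD r 0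
          = pvW n base (pvBB critical bwd) r (d - 1 - r) := by
  have hinit : pvAt v 0 + pvAt bwd (critical + 1) + pvCOMM_OVERHEAD
      = pvP n base (pvBB critical bwd) d 0 := by
    have h0 : pvAt v 0 = pvW n base (pvBB critical bwd) 0 d := by
      rw [show (0 : Int) = ((0 : Nat) : Int) by norm_num, pvAt_natCast]
      have := hv 0 (by omega)
      simpa using this
    have hb : pvAt bwd (critical + 1) = pvBB critical bwd 0 := by
      unfold pvBB; congr 1; push_cast; ring
    rw [h0, hb, pvP]
    simp [pvCOMM_OVERHEAD]
  intro k
  induction k with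
  | zero =>
    intro _
    refine ⟨by simpa using hinit, by simp, by omega⟩
  | succ k ih =>
    intro hk
    obtain ⟨ih1, ih2, ih3⟩ := ih (by omega)
    rw [List.range_succ, List.foldl_append, List.foldl_cons, List.foldl_nil]
    set p := (List.range k).foldl (fun p (r : Nat) => b2Step critical bwd v p (r : Int))
      (pvAt v 0 + pvAt bwd (critical + 1) + pvCOMM_OVERHEAD, []) with hp
    have e1 : (k : Int) + 1 = ((k + 1 : Nat) : Int) := by push_cast; ring
    have hv1 : pvAt v ((k : Int) + 1) = pvW n base (pvBB critical bwd) (k + 1) (d - (k + 1)) := by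
      rw [e1, pvAt_natCast]; exact hv (k + 1) (by omega)
    have hb1 : pvAt bwd (critical + 1 + (k : Int) + 1) = pvBB critical bwd (k + 1) := by
      unfold pvBB; congr 1; push_cast; ring
    have hrun : max p.1 (pvAt v ((k : Int) + 1) + pvAt bwd (critical + 1 + (k : Int) + 1) +
        pvCOMM_OVERHEAD) = pvP n base (pvBB critical bwd) d (k + 1) := by
      rw [ih1, hv1, hb1, pvP]
      simp [pvCOMM_OVERHEAD]
    have hval : pvP n base (pvBB critical bwd) d (k + 1)
        = pvW n base (pvBB critical bwd) k (d - 1 - k) := by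
      rw [pvW_unroll n base (pvBB critical bwd) k (d - 1 - k) (by omega),
        show k + (d - 1 - k) + 1 = d by omega]
    refine ⟨?_, ?_, ?_⟩
    · show max p.1 _ = _
      exact hrun
    · show (p.2 ++ [_]).length = k + 1
      simp [ih2]
    · intro r hr
      show (p.2 ++ [max p.1 _]).getD r 0 = _
      rcases Nat.lt_or_ge r k with h | h
      · rw [List.getD_append _ _ _ _ (by omega), ih3 r h]
      · have hrk : r = k := by omega
        subst hrk
        rw [← ih2, getD_append_self, ih2, hrun, hval]

theorem B_outer2 (critical sz : Int) (bwd : List Int) (n : Nat) (base : Nat → Int)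
    (hsz : ((n : Nat) : Int) = sz) (v0 : List Int) (h0len : v0.length = n)
    (h0 : ∀ s, s < n → v0.getD s 0 = pvW n base (pvBB critical bwd) s (n - 1 - s)) :
    ∀ j, j + 1 ≤ n →
      ((PySem.List.pyRange 1 ((j + 1 : Nat) : Int) 1).foldl
          (b2Outer critical sz bwd) v0).length = n - j ∧
      ∀ s, s + j + 1 ≤ n →
        ((PySem.List.pyRange 1 ((j + 1 : Nat) : Int) 1).foldl
            (b2Outer critical sz bwd) v0).getD s 0
          = pvW n base (pvBB critical bwd) s (n - 1 - j - s) := by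
  intro j
  induction j with
  | zero =>
    intro _
    rw [show ((0 + 1 : Nat) : Int) = 1 by norm_num,
      PySem.List.pyRange_one_eq_nil (le_refl _), List.foldl_nil]
    exact ⟨h0len, fun s hs => h0 s (by omega)⟩
  | succ j ih =>
    intro hj
    obtain ⟨ih1, ih2⟩ := ih (by omega)
    rw [show ((j + 1 + 1 : Nat) : Int) = ((j + 1 : Nat) : Int) + 1 by push_cast; ring,
      PySem.List.pyRange_one_succ_right (by exact_mod_cast Nat.one_le_iff_ne_zero.mpr (by omega)),
      List.foldl_append, List.foldl_cons, List.foldl_nil]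
    set P := (PySem.List.pyRange 1 ((j + 1 : Nat) : Int) 1).foldl (b2Outer critical sz bwd) v0
      with hP
    set d := n - 1 - j with hdj
    have hrange : sz - ((j + 1 : Nat) : Int) = ((d : Nat) : Int) := by
      rw [← hsz]; push_cast; omega
    have hfold : b2Outer critical sz bwd P ((j + 1 : Nat) : Int)
        = ((List.range d).foldl (fun p (r : Nat) => b2Step critical bwd P p (r : Int))
            (pvAt P 0 + pvAt bwd (critical + 1) + pvCOMM_OVERHEAD, [])).2 := by
      unfold b2Outer
      rw [hrange, PySem.List.pyRange_zero_nat, List.foldl_map]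
    obtain ⟨_, hlen, hval⟩ := B_inner2 critical bwd n base d (by omega) P
      (fun s hs => by rw [ih2 s (by omega)]) d (le_refl _)
    rw [hfold]
    refine ⟨?_, fun s hs => ?_⟩
    · rw [hlen]; omega
    · rw [hval s (by omega), show d - 1 - s = n - 1 - (j + 1) - s by omega]

theorem B_eq (num_stages critical last_fwd_start : Int) (fwd bwd : List Int)
    (h : 0 < num_stages - critical) :
    cooldown_py_alt num_stages critical last_fwd_start fwd bwd =
      pvW (num_stages - critical).toNat (pvBase num_stages critical fwd last_fwd_start)
        (pvBB critical bwd) 0 0 := by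
  set n := (num_stages - critical).toNat with hn
  have hsz : ((n : Int)) = num_stages - critical := Int.toNat_of_nonneg (by omega)
  have hn1 : 1 ≤ n := by omega
  unfold cooldown_py_alt
  rw [if_neg (show ¬ num_stages - critical ≤ 0 by omega)]
  show pvAt ((PySem.List.pyRange 1 (num_stages - critical) 1).foldl
      (b2Outer critical (num_stages - critical) bwd)
      ((PySem.List.pyRange 0 (num_stages - critical) 1).foldl
        (fun st i => bStep1 num_stages critical fwd st i) ([], last_fwd_start)).1) 0 = _
  rw [← hsz, PySem.List.pyRange_zero_nat, List.foldl_map, B_loop1]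
  have h0 : ∀ s, s < n → ((List.range n).map
      (pvBase num_stages critical fwd last_fwd_start)).getD s 0
      = pvW n (pvBase num_stages critical fwd last_fwd_start) (pvBB critical bwd) s
          (n - 1 - s) := by
    intro s hs
    rw [PySem.List.getD_map_range _ _ _ _ hs, pvW_of_le _ _ (by omega)]
  obtain ⟨hlen, hval⟩ := B_outer2 critical ((n : Nat) : Int) bwd n
    (pvBase num_stages critical fwd last_fwd_start) rfl
    ((List.range n).map (pvBase num_stages critical fwd last_fwd_start),
      pvAcc num_stages critical fwd last_fwd_start n).1 (by simp) h0 (n - 1) (by omega)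
  rw [show ((n : Int)) = ((n - 1 + 1 : Nat) : Int) by omega] at hval ⊢
  rw [show (0 : Int) = ((0 : Nat) : Int) by norm_num, pvAt_natCast, hval 0 (by omega),
    show n - 1 - (n - 1) - 0 = 0 by omega]

-- ===== A-side: the column-major 2-D table also computes pvW =====

def aStep1 (num_stages critical sz : Int) (fwd : List Int) (st : List (List Int) × Int)
    (i : Int) : List (List Int) × Int :=
  let b1 := st.2 + pvAt fwd (critical + 1 + i)
  let b2 := if critical + i ≠ num_stages - 1 then b1 + pvCOMM_OVERHEAD else b1
  (pvSet2 st.1 i (sz - 1 - i) b2, b2)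

def aStep2 (critical : Int) (bwd : List Int) (col : Int) (dp : List (List Int)) (row : Int) :
    List (List Int) :=
  let o1 := pvGet2 dp row (col + 1) + pvAt bwd (critical + 1 + row) + pvCOMM_OVERHEAD
  let o2 := pvGet2 dp (row + 1) col + pvAt bwd (critical + 1 + row + 1) + pvCOMM_OVERHEAD
  let dp' := pvSet2 dp row col (max o1 o2)
  if row > 0 then
    pvSet2 dp' row col (max (pvGet2 dp' row col) (pvGet2 dp' (row - 1) (col + 1)))
  else dp'

def aOuter (critical sz : Int) (bwd : List Int) (dp : List (List Int)) (col : Int) :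
    List (List Int) :=
  (PySem.List.pyRange (sz - col - 2) (-1) (-1)).foldl (aStep2 critical bwd col) dp

theorem getD_row_set (M : List (List Int)) (r : Nat) (R : List Int) (hr : r < M.length) :
    (M.set r R).getD r [] = R := by
  rw [List.getD_eq_getElem?_getD, List.getElem?_set, if_pos rfl, if_pos hr, Option.getD_some]

theorem Dims_replicate (n : Nat) : Dims n (List.replicate n (List.replicate n (0 : Int))) := by
  refine ⟨by simp, fun r hr => ?_⟩
  rw [List.getD_eq_getElem?_getD, List.getElem?_replicate, if_pos hr]
  simp

theorem A_loop1 (num_stages critical : Int) (fwd : List Int) (lfs : Int) (n : Nat) :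
    ∀ k, k ≤ n → ∀ M0 : List (List Int), Dims n M0 →
      ∃ M, (List.range k).foldl
            (fun st (i : Nat) => aStep1 num_stages critical (n : Int) fwd st (i : Int))
            (M0, lfs) = (M, pvAcc num_stages critical fwd lfs k) ∧
        Dims n M ∧
        ∀ i < k, getD2 M i (n - 1 - i) = pvBase num_stages critical fwd lfs i := by
  intro k
  induction k with
  | zero =>
    intro _ M0 h0
    exact ⟨M0, by simp [pvAcc], h0, by omega⟩
  | succ k ih =>
    intro hk M0 h0
    obtain ⟨M, hfold, hD, hdiag⟩ := ih (by omega) M0 h0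
    have hjM : k < M.length := by rw [hD.1]; omega
    have hcl : n - 1 - k < (M.getD k []).length := by rw [hD.2 k (by omega)]; omega
    refine ⟨M.set k ((M.getD k []).set (n - 1 - k) (pvAcc num_stages critical fwd lfs (k + 1))),
      ?_, Dims_set n M k (n - 1 - k) _ hD (by omega), ?_⟩
    · rw [List.range_succ, List.foldl_append, hfold, List.foldl_cons, List.foldl_nil]
      unfold aStep1
      have ht : (if critical + (k : Int) ≠ num_stages - 1
          then pvAcc num_stages critical fwd lfs k + pvAt fwd (critical + 1 + (k : Int)) +
            pvCOMM_OVERHEAD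
          else pvAcc num_stages critical fwd lfs k + pvAt fwd (critical + 1 + (k : Int)))
          = pvAcc num_stages critical fwd lfs (k + 1) := by
        simp only [pvAcc]
      simp only [ht]
      rw [show (n : Int) - 1 - (k : Int) = ((n - 1 - k : Nat) : Int) by omega,
        pvSet2_natCast M k (n - 1 - k) _ hjM hcl]
    · intro i hi
      rw [getD2_set M k (n - 1 - k) _ i (n - 1 - i) hjM hcl]
      rcases Nat.lt_or_ge i k with h | h
      · rw [if_neg (by rintro ⟨rfl, -⟩; omega), hdiag i h]
      · have : i = k := by omega
        subst this
        rw [if_pos ⟨rfl, rfl⟩, pvBase]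

theorem A_body (critical : Int) (bwd : List Int) (n : Nat) (base : Nat → Int) (cc j : Nat)
    (hj : j + cc + 2 ≤ n) (M : List (List Int)) (hD : Dims n M)
    (hdiag : ∀ r c, r + c + 1 = n → getD2 M r c = pvW n base (pvBB critical bwd) r c)
    (hright : ∀ r c, cc + 1 ≤ c → r + c + 2 ≤ n →
      getD2 M r c = pvW n base (pvBB critical bwd) r c)
    (hcur : ∀ r, j + 1 ≤ r → r + cc + 2 ≤ n →
      getD2 M r cc = pvW n base (pvBB critical bwd) r cc) :
    aStep2 critical bwd (cc : Int) M (j : Int) =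
      M.set j ((M.getD j []).set cc (pvW n base (pvBB critical bwd) j cc)) := by
  obtain ⟨hL, hRL⟩ := hD
  have hjM : j < M.length := by rw [hL]; omega
  have hcc_len : cc < (M.getD j []).length := by rw [hRL j (by omega)]; omega
  have e1 : (cc : Int) + 1 = ((cc + 1 : Nat) : Int) := by push_cast; ring
  have e2 : (j : Int) + 1 = ((j + 1 : Nat) : Int) := by push_cast; ring
  have ho1 : pvGet2 M (j : Int) ((cc : Int) + 1) = pvW n base (pvBB critical bwd) j (cc + 1) := by
    rw [e1, pvGet2_natCast]
    rcases Nat.lt_or_ge (j + (cc + 1) + 1) n with hlt | hge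
    · exact hright j (cc + 1) (by omega) (by omega)
    · exact hdiag j (cc + 1) (by omega)
  have ho2 : pvGet2 M ((j : Int) + 1) (cc : Int) = pvW n base (pvBB critical bwd) (j + 1) cc := by
    rw [e2, pvGet2_natCast]
    rcases Nat.lt_or_ge ((j + 1) + cc + 1) n with hlt | hge
    · exact hcur (j + 1) (by omega) (by omega)
    · exact hdiag (j + 1) cc (by omega)
  have hb1 : pvAt bwd (critical + 1 + (j : Int)) = pvBB critical bwd j := rfl
  have hb2 : pvAt bwd (critical + 1 + (j : Int) + 1) = pvBB critical bwd (j + 1) := by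
    unfold pvBB; congr 1; push_cast; ring
  unfold aStep2
  simp only [ho1, ho2, hb1, hb2, pvCOMM_OVERHEAD, add_zero]
  set m := max (pvW n base (pvBB critical bwd) j (cc + 1) + pvBB critical bwd j)
               (pvW n base (pvBB critical bwd) (j + 1) cc + pvBB critical bwd (j + 1)) with hm
  have hset1 : pvSet2 M (j : Int) (cc : Int) m = M.set j ((M.getD j []).set cc m) :=
    pvSet2_natCast M j cc m hjM hcc_len
  rcases Nat.eq_zero_or_pos j with rfl | hj0
  · rw [if_neg (by simp), hset1]
    have : pvW n base (pvBB critical bwd) 0 cc = m := by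
      rw [pvW_of_lt _ _ (by omega), if_pos rfl]
    rw [this]
  · rw [if_pos (by exact_mod_cast hj0), hset1]
    have hg_self : pvGet2 (M.set j ((M.getD j []).set cc m)) (j : Int) (cc : Int) = m := by
      rw [pvGet2_natCast, getD2_set M j cc m j cc hjM hcc_len, if_pos ⟨rfl, rfl⟩]
    have e3 : (j : Int) - 1 = ((j - 1 : Nat) : Int) := by omega
    have hg_diag : pvGet2 (M.set j ((M.getD j []).set cc m)) ((j : Int) - 1) ((cc : Int) + 1) =
        pvW n base (pvBB critical bwd) (j - 1) (cc + 1) := by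
      rw [e3, e1, pvGet2_natCast, getD2_set M j cc m (j - 1) (cc + 1) hjM hcc_len,
        if_neg (by rintro ⟨-, h⟩; omega)]
      exact hright (j - 1) (cc + 1) (by omega) (by omega)
    rw [hg_self, hg_diag]
    have hjM' : j < (M.set j ((M.getD j []).set cc m)).length := by simp [hjM]
    have hrow' : (M.set j ((M.getD j []).set cc m)).getD j [] = (M.getD j []).set cc m :=
      getD_row_set _ _ _ hjM
    rw [pvSet2_natCast _ j cc _ hjM' (by rw [hrow', List.length_set]; exact hcc_len), hrow',
      List.set_set, List.set_set]
    have : pvW n base (pvBB critical bwd) j cc = max m (pvW n base (pvBB critical bwd) (j - 1) (cc + 1)) := by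
      rw [pvW_of_lt _ _ (by omega), if_neg (by omega)]
    rw [this]

theorem A_upd (critical : Int) (bwd : List Int) (n : Nat) (base : Nat → Int) (cc j : Nat)
    (hj : j + cc + 2 ≤ n) (M : List (List Int)) (hD : Dims n M)
    (hdiag : ∀ r c, r + c + 1 = n → getD2 M r c = pvW n base (pvBB critical bwd) r c)
    (hright : ∀ r c, cc + 1 ≤ c → r + c + 2 ≤ n →
      getD2 M r c = pvW n base (pvBB critical bwd) r c)
    (hcur : ∀ r, j + 1 ≤ r → r + cc + 2 ≤ n →
      getD2 M r cc = pvW n base (pvBB critical bwd) r cc) :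
    Dims n (M.set j ((M.getD j []).set cc (pvW n base (pvBB critical bwd) j cc))) ∧
    (∀ r c, r + c + 1 = n →
      getD2 (M.set j ((M.getD j []).set cc (pvW n base (pvBB critical bwd) j cc))) r c =
        pvW n base (pvBB critical bwd) r c) ∧
    (∀ r c, cc + 1 ≤ c → r + c + 2 ≤ n →
      getD2 (M.set j ((M.getD j []).set cc (pvW n base (pvBB critical bwd) j cc))) r c =
        pvW n base (pvBB critical bwd) r c) ∧
    (∀ r, j ≤ r → r + cc + 2 ≤ n →
      getD2 (M.set j ((M.getD j []).set cc (pvW n base (pvBB critical bwd) j cc))) r cc =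
        pvW n base (pvBB critical bwd) r cc) := by
  have hjM : j < M.length := by rw [hD.1]; omega
  have hcc_len : cc < (M.getD j []).length := by rw [hD.2 j (by omega)]; omega
  refine ⟨Dims_set n M j cc _ hD (by omega), ?_, ?_, ?_⟩
  · intro r c hrc
    rw [getD2_set M j cc _ r c hjM hcc_len, if_neg (by rintro ⟨rfl, rfl⟩; omega)]
    exact hdiag r c hrc
  · intro r c hc hrc
    rw [getD2_set M j cc _ r c hjM hcc_len, if_neg (by rintro ⟨-, rfl⟩; omega)]
    exact hright r c hc hrc
  · intro r hr hrc
    rw [getD2_set M j cc _ r cc hjM hcc_len]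
    rcases Nat.eq_or_lt_of_le hr with rfl | h
    · rw [if_pos ⟨rfl, rfl⟩]
    · rw [if_neg (by rintro ⟨rfl, -⟩; omega)]
      exact hcur r (by omega) hrc

theorem A_inner (critical : Int) (bwd : List Int) (n : Nat) (base : Nat → Int) (cc : Nat) :
    ∀ j M, j + cc + 2 ≤ n → Dims n M →
      (∀ r c, r + c + 1 = n → getD2 M r c = pvW n base (pvBB critical bwd) r c) →
      (∀ r c, cc + 1 ≤ c → r + c + 2 ≤ n →
        getD2 M r c = pvW n base (pvBB critical bwd) r c) →
      (∀ r, j + 1 ≤ r → r + cc + 2 ≤ n →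
        getD2 M r cc = pvW n base (pvBB critical bwd) r cc) →
      Dims n ((PySem.List.pyRange (j : Int) (-1) (-1)).foldl (aStep2 critical bwd (cc : Int)) M) ∧
      (∀ r c, r + c + 1 = n →
        getD2 ((PySem.List.pyRange (j : Int) (-1) (-1)).foldl (aStep2 critical bwd (cc : Int)) M) r c =
          pvW n base (pvBB critical bwd) r c) ∧
      (∀ r c, cc + 1 ≤ c → r + c + 2 ≤ n →
        getD2 ((PySem.List.pyRange (j : Int) (-1) (-1)).foldl (aStep2 critical bwd (cc : Int)) M) r c =
          pvW n base (pvBB critical bwd) r c) ∧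
      (∀ r, r + cc + 2 ≤ n →
        getD2 ((PySem.List.pyRange (j : Int) (-1) (-1)).foldl (aStep2 critical bwd (cc : Int)) M) r cc =
          pvW n base (pvBB critical bwd) r cc) := by
  intro j
  induction j with
  | zero =>
    intro M hj hD hdiag hright hcur
    rw [PySem.List.pyRange_neg_one_cons (by omega), List.foldl_cons,
      A_body critical bwd n base cc 0 hj M hD hdiag hright hcur,
      show ((0 : Nat) : Int) - 1 = -1 by simp, PySem.List.pyRange_neg_one_eq_nil (le_refl _),
      List.foldl_nil]
    obtain ⟨h1, h2, h3, h4⟩ := A_upd critical bwd n base cc 0 hj M hD hdiag hright hcur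
    exact ⟨h1, h2, h3, fun r hrc => h4 r (by omega) hrc⟩
  | succ k ih =>
    intro M hj hD hdiag hright hcur
    rw [PySem.List.pyRange_neg_one_cons (by omega), List.foldl_cons,
      A_body critical bwd n base cc (k + 1) hj M hD hdiag hright hcur,
      show ((k + 1 : Nat) : Int) - 1 = ((k : Nat) : Int) by push_cast; ring]
    obtain ⟨h1, h2, h3, h4⟩ := A_upd critical bwd n base cc (k + 1) hj M hD hdiag hright hcur
    exact ih _ (by omega) h1 h2 h3 (fun r hr hrc => h4 r (by omega) hrc)

theorem A_outer (critical : Int) (bwd : List Int) (n : Nat) (base : Nat → Int) :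
    ∀ cc : Nat, cc + 2 ≤ n → ∀ M, Dims n M →
      (∀ r c, r + c + 1 = n → getD2 M r c = pvW n base (pvBB critical bwd) r c) →
      (∀ r c, cc + 1 ≤ c → r + c + 2 ≤ n →
        getD2 M r c = pvW n base (pvBB critical bwd) r c) →
      ∀ r c, r + c + 2 ≤ n →
        getD2 ((PySem.List.pyRange (cc : Int) (-1) (-1)).foldl
            (fun dp col => aOuter critical (n : Int) bwd dp col) M) r c =
          pvW n base (pvBB critical bwd) r c := by
  intro cc
  induction cc with
  | zero =>
    intro hcc M hD hdiag hright r c hrc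
    rw [PySem.List.pyRange_neg_one_cons (by omega), List.foldl_cons,
      show ((0 : Nat) : Int) - 1 = -1 by simp, PySem.List.pyRange_neg_one_eq_nil (le_refl _),
      List.foldl_nil]
    have hin : aOuter critical (n : Int) bwd M ((0 : Nat) : Int) =
        (PySem.List.pyRange ((n - 2 : Nat) : Int) (-1) (-1)).foldl
          (aStep2 critical bwd ((0 : Nat) : Int)) M := by
      unfold aOuter
      rw [show (n : Int) - ((0 : Nat) : Int) - 2 = ((n - 2 : Nat) : Int) by omega]
    rw [hin]
    obtain ⟨h1, h2, h3, h4⟩ := A_inner critical bwd n base 0 (n - 2) M (by omega) hD hdiag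
      hright (fun r hr hrc => by omega)
    rcases Nat.eq_zero_or_pos c with rfl | hc
    · exact h4 r hrc
    · exact h3 r c (by omega) hrc
  | succ k ih =>
    intro hcc M hD hdiag hright r c hrc
    rw [PySem.List.pyRange_neg_one_cons (by omega), List.foldl_cons,
      show ((k + 1 : Nat) : Int) - 1 = ((k : Nat) : Int) by push_cast; ring]
    have hin : aOuter critical (n : Int) bwd M ((k + 1 : Nat) : Int) =
        (PySem.List.pyRange ((n - k - 3 : Nat) : Int) (-1) (-1)).foldl
          (aStep2 critical bwd ((k + 1 : Nat) : Int)) M := by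
      unfold aOuter
      rw [show (n : Int) - ((k + 1 : Nat) : Int) - 2 = ((n - k - 3 : Nat) : Int) by omega]
    rw [hin]
    obtain ⟨h1, h2, h3, h4⟩ := A_inner critical bwd n base (k + 1) (n - k - 3) M (by omega) hD
      hdiag hright (fun r hr hrc => by omega)
    refine ih (by omega) _ h1 h2 (fun r' c' hc' hrc' => ?_) r c hrc
    rcases Nat.eq_or_lt_of_le hc' with h | h
    · rw [← h] at hrc' ⊢
      exact h4 r' hrc'
    · exact h3 r' c' (by omega) hrc'

theorem pvGet2_zero (M : List (List Int)) : pvGet2 M 0 0 = getD2 M 0 0 := pvGet2_natCast M 0 0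

theorem A_eq (num_stages critical last_fwd_start : Int) (fwd bwd : List Int)
    (h : 0 < num_stages - critical) :
    cooldown_py num_stages critical last_fwd_start fwd bwd =
      pvW (num_stages - critical).toNat (pvBase num_stages critical fwd last_fwd_start)
        (pvBB critical bwd) 0 0 := by
  set n := (num_stages - critical).toNat with hn
  have hsz : ((n : Int)) = num_stages - critical := Int.toNat_of_nonneg (by omega)
  have hn1 : 1 ≤ n := by omega
  unfold cooldown_py
  rw [if_neg (show ¬ num_stages - critical ≤ 0 by omega)]
  show pvGet2 ((PySem.List.pyRange (num_stages - critical - 2) (-1) (-1)).foldl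
      (fun dp col => aOuter critical (num_stages - critical) bwd dp col)
      ((PySem.List.pyRange 0 (num_stages - critical) 1).foldl
        (fun st i => aStep1 num_stages critical (num_stages - critical) fwd st i)
        (List.replicate (num_stages - critical).toNat
          (List.replicate (num_stages - critical).toNat 0), last_fwd_start)).1) 0 0 = _
  rw [← hsz, Int.toNat_natCast, PySem.List.pyRange_zero_nat, List.foldl_map]
  obtain ⟨M1, hfold, hD1, hdiag1⟩ :=
    A_loop1 num_stages critical fwd last_fwd_start n n (le_refl _) _ (Dims_replicate n)
  rw [hfold]
  have hdiagW : ∀ r c, r + c + 1 = n → getD2 M1 r c =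
      pvW n (pvBase num_stages critical fwd last_fwd_start) (pvBB critical bwd) r c := by
    intro r c hrc
    have hc : c = n - 1 - r := by omega
    subst hc
    rw [hdiag1 r (by omega), pvW_of_le _ _ (by omega)]
  rcases Nat.lt_or_ge n 2 with h2 | h2
  · rw [PySem.List.pyRange_neg_one_eq_nil (show ((n : Int)) - 2 ≤ -1 by omega), List.foldl_nil,
      pvGet2_zero]
    exact hdiagW 0 0 (by omega)
  · rw [show ((n : Int)) - 2 = ((n - 2 : Nat) : Int) by omega, pvGet2_zero]
    exact A_outer critical bwd n _ (n - 2) (by omega) M1 hD1 hdiagW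
      (fun r c hc hrc => by omega) 0 0 (by omega)

-- ===== VERDICT =====
theorem cooldown_py_spec : Claim_equal_cooldown_py := by
  intro num_stages critical last_fwd_start fwd bwd _ _
  unfold Spec_cooldown_py
  by_cases h : num_stages - critical ≤ 0
  · unfold cooldown_py cooldown_py_alt
    rw [if_pos h, if_pos h]
  · rw [A_eq _ _ _ _ _ (by omega), B_eq _ _ _ _ _ (by omega)]
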